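-- pv_equiv track=rewrite | github.com/zzhtx258/COMP3520GP | nanobot/channels/feishu.py | _split_elements_by_table_limit
-- ===== SOURCE A (Python) =====
-- def _split_elements_by_table_limit(elements: list[dict], max_tables: int = 1) -> list[list[dict]]:
--     """Split card elements into groups with at most *max_tables* table elements each.
--
--     Feishu cards have a hard limit of one table per card (API error 11310).
--     When the rendered content contains multiple markdown tables each table is
--     placed in a separate card message so every table reaches the user.
--     """
--     if not elements:
--         return [[]]
--     groups: list[list[dict]] = []
--     current: list[dict] = []
--     table_count = 0
--     for el in elements:
--         if el.get("tag") == "table":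
--             if table_count >= max_tables:
--                 if current:
--                     groups.append(current)
--                 current = []
--                 table_count = 0
--             current.append(el)
--             table_count += 1
--         else:
--             current.append(el)
--     if current:
--         groups.append(current)
--     return groups or [[]]
-- ===== SOURCE B (Python) =====
-- def _split_elements_by_table_limit(elements: list[dict], max_tables: int = 1) -> list[list[dict]]:
--     """Two-phase rewrite: first compute split-point indices, then slice."""
--     if not elements:
--         return [[]]
--     bounds = [0]
--     table_count = 0
--     for i, el in enumerate(elements):
--         if el.get("tag") == "table":
--             if table_count >= max_tables:
--                 if i:  # index 0 is already a boundary; never open an empty group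
--                     bounds.append(i)
--                 table_count = 0
--             table_count += 1
--     bounds.append(len(elements))
--     return [elements[a:b] for a, b in zip(bounds, bounds[1:])]
-- ===== Notes on version B (the rewrite author's own statement) =====
-- stated objective: alternative
-- what changed: Replaces A's single-pass incremental group building (append to a running `current`, flush into `groups`) by a two-phase decomposition: a first pass records only the boundary indices where a new group must start, then the result is assembled by slicing the input between consecutive boundaries.
import Mathlib
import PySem

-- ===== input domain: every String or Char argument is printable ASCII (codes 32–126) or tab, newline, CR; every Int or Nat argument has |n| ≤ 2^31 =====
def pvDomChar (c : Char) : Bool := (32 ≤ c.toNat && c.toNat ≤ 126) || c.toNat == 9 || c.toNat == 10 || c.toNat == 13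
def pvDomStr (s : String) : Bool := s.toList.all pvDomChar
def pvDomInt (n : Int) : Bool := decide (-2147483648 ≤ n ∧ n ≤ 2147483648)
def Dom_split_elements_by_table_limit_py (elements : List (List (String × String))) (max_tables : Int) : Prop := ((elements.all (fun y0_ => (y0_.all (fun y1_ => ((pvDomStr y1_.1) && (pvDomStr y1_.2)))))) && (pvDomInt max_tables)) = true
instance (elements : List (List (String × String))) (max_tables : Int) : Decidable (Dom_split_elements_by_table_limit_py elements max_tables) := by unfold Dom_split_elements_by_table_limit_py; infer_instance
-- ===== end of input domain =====

-- B replaces A's incremental group building by a two-phase decomposition (boundary indices, then slicing); objective: alternative structure, same cost.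

-- ===== PORT A =====
-- el.get("tag") == "table"
def pvIsTable (el : List (String × String)) : Bool :=
  (PySem.Dict.mk el).get? "tag" == some "table"

-- the for-loop of A over the elements, state (groups, current, table_count)
def pvALoop (max_tables : Int) :
    List (List (String × String)) →
    List (List (List (String × String))) → List (List (String × String)) → Int →
    List (List (List (String × String))) × List (List (String × String)) × Int
  | [], groups, current, tc => (groups, current, tc)
  | el :: rest, groups, current, tc =>
    if pvIsTable el then
      if tc ≥ max_tables then
        -- table_count = 0; current = [el]; table_count += 1
        pvALoop max_tables rest (if current ≠ [] then groups ++ [current] else groups) [el] (0 + 1)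
      else
        pvALoop max_tables rest groups (current ++ [el]) (tc + 1)
    else
      pvALoop max_tables rest groups (current ++ [el]) tc

def split_elements_by_table_limit_py (elements : List (List (String × String))) (max_tables : Int) : List (List (List (String × String))) :=
  if elements = [] then [[]]
  else
    let r := pvALoop max_tables elements [] [] 0
    let groups := if r.2.1 ≠ [] then r.1 ++ [r.2.1] else r.1
    if groups = [] then [[]] else groups

-- ===== PORT B =====
-- one step of B's boundary-collecting loop over enumerate(elements); state (bounds, table_count)
def pvBStep (max_tables : Int) (s : List Int × Int) (ie : Int × List (String × String)) : List Int × Int :=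
  if pvIsTable ie.2 then
    if s.2 ≥ max_tables then
      ((if ie.1 ≠ 0 then s.1 ++ [ie.1] else s.1), 0 + 1)
    else (s.1, s.2 + 1)
  else s

def split_elements_by_table_limit_py_alt (elements : List (List (String × String))) (max_tables : Int) : List (List (List (String × String))) :=
  if elements = [] then [[]]
  else
    let bounds := ((PySem.List.enumerate elements 0).foldl (pvBStep max_tables) ([0], 0)).1
    let bounds := bounds ++ [PySem.List.len elements]
    (bounds.zip bounds.tail).map (fun p => PySem.List.slice elements (some p.1) (some p.2))

-- ===== PRECONDITION & SPEC =====
def Spec_split_elements_by_table_limit_py (elements : List (List (String × String))) (max_tables : Int) (out : List (List (List (String × String)))) : Prop := out = split_elements_by_table_limit_py_alt elements max_tables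
instance (elements : List (List (String × String))) (max_tables : Int) (out : List (List (List (String × String)))) : Decidable (Spec_split_elements_by_table_limit_py elements max_tables out) := by unfold Spec_split_elements_by_table_limit_py; infer_instance

-- ===== CLAIM (what is proved, stated in full; the proofs are below) =====
def Claim_equal_split_elements_by_table_limit_py : Prop := ∀ (elements : List (List (String × String))) (max_tables : Int), Dom_split_elements_by_table_limit_py elements max_tables → Spec_split_elements_by_table_limit_py elements max_tables (split_elements_by_table_limit_py elements max_tables)

-- ===== LEMMAS AND PROOFS =====

-- clean Nat-indexed form of B's boundary pass (proof helper)
def pvGB (max_tables : Int) :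
    List (List (String × String)) → Nat → Int → List Nat
  | [], _, _ => []
  | el :: rest, i, tc =>
    if pvIsTable el then
      if tc ≥ max_tables then
        (if i ≠ 0 then [i] else []) ++ pvGB max_tables rest (i + 1) 1
      else pvGB max_tables rest (i + 1) (tc + 1)
    else pvGB max_tables rest (i + 1) tc

-- slicing between consecutive Nat bounds
def pvSl (es : List (List (String × String))) (a b : Nat) : List (List (String × String)) :=
  (es.drop a).take (b - a)

def pvChunks (es : List (List (String × String))) (bs : List Nat) : List (List (List (String × String))) :=
  (bs.zip bs.tail).map (fun p => pvSl es p.1 p.2)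

def pvFin (r : List (List (List (String × String))) × List (List (String × String)) × Int) :
    List (List (List (String × String))) :=
  if r.2.1 ≠ [] then r.1 ++ [r.2.1] else r.1

lemma pvFin_append (gs : List (List (List (String × String))))
    (x : List (List (List (String × String))) × List (List (String × String)) × Int) :
    pvFin (gs ++ x.1, x.2) = gs ++ pvFin x := by
  unfold pvFin; split_ifs <;> simp

-- A's groups accumulator is purely appended in front
lemma pvALoop_acc (m : Int) :
    ∀ (rest : List (List (String × String))) gs cur tc,
      pvALoop m rest gs cur tc =
        ((gs ++ (pvALoop m rest [] cur tc).1), (pvALoop m rest [] cur tc).2) := by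
  intro rest gs cur tc
  induction rest generalizing gs cur tc with
  | nil => simp [pvALoop]
  | cons el r ih =>
    simp only [pvALoop]
    split_ifs with h1 h2 h3
    · rw [ih (gs ++ [cur]), ih ([] ++ [cur])]; simp
    · rw [ih gs]
    · rw [ih gs]
    · rw [ih gs]

-- bridge: B's foldl over enumerate equals the clean boundary recursion
lemma pvBfold (m : Int) :
    ∀ (rest : List (List (String × String))) (i : Nat) (bs : List Int) (tc : Int),
      ((PySem.List.enumerate rest (i : Int)).foldl (pvBStep m) (bs, tc)).1 =
        bs ++ (pvGB m rest i tc).map (fun n => (n : Int)) := by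
  intro rest i bs tc
  induction rest generalizing i bs tc with
  | nil => simp [PySem.List.enumerate_nil, pvGB]
  | cons el r ih =>
    rw [PySem.List.enumerate_cons, List.foldl_cons]
    have hcast : ((i : Int) + 1) = ((i + 1 : Nat) : Int) := by push_cast; ring
    simp only [pvBStep, pvGB]
    by_cases ht : pvIsTable el = true
    · by_cases hge : tc ≥ m
      · by_cases hi : i = 0
        · subst hi
          simp only [ht, hge, if_true, Nat.cast_zero, ne_eq, not_true_eq_false, ite_false]
          rw [show ((0:Int) + 1) = ((1 : Nat) : Int) by norm_num, ih]
          simp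
        · have hi' : ((i : Int)) ≠ 0 := by exact_mod_cast hi
          simp only [ht, hge, if_true, hi', ne_eq, not_false_eq_true, hi]
          rw [hcast, ih]
          simp
      · simp only [ht, hge, if_true, if_false]
        rw [hcast, ih]
    · simp only [ht, Bool.false_eq_true, if_false]
      rw [hcast, ih]

-- slicing between consecutive bounds: helper identities
lemma pvSl_prefix (pre xs : List (List (String × String))) (j : Nat) (hj : j ≤ pre.length) :
    pvSl (pre ++ xs) j pre.length = pre.drop j := by
  unfold pvSl
  rw [List.drop_append_of_le_length hj, List.take_left']
  simp

lemma pvChunks_cons (es : List (List (String × String))) (a b : Nat) (bs : List Nat) :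
    pvChunks es (a :: b :: bs) = pvSl es a b :: pvChunks es (b :: bs) := by
  simp [pvChunks]

-- main invariant: A's loop from state ([], pre.drop j, tc) produces the chunks at boundaries j :: pvGB … ++ [length]
lemma pvMain (m : Int) :
    ∀ (rest pre : List (List (String × String))) (j : Nat) (tc : Int),
      j ≤ pre.length → (j = pre.length → pre = []) → pre ++ rest ≠ [] →
      pvFin (pvALoop m rest [] (pre.drop j) tc) =
        pvChunks (pre ++ rest) (j :: pvGB m rest pre.length tc ++ [(pre ++ rest).length]) := by
  intro rest
  induction rest with
  | nil =>
    intro pre j tc hj hje hne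
    have hpre : pre ≠ [] := by simpa using hne
    have hjlt : j < pre.length := by
      rcases lt_or_eq_of_le hj with h | h
      · exact h
      · exact absurd (hje h) hpre
    have hdrop : pre.drop j ≠ [] := by
      intro h
      have := List.drop_eq_nil_iff.mp h
      omega
    simp only [pvALoop, pvFin, pvGB, List.append_nil, ne_eq, hdrop, not_false_eq_true, if_true,
      List.nil_append]
    simp [pvChunks, pvSl]
  | cons el r ih =>
    intro pre j tc hj hje hne
    by_cases ht : pvIsTable el = true
    · by_cases hge : tc ≥ m
      · -- trigger branch of A
        by_cases hcur : pre.drop j = []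
        · -- current empty: only possible with pre = [] and j = 0
          have hplen : pre.length ≤ j := List.drop_eq_nil_iff.mp hcur
          have hpre : pre = [] := hje (le_antisymm hj hplen)
          subst hpre
          have hj0 : j = 0 := Nat.le_zero.mp hj
          subst hj0
          rw [show pvALoop m (el :: r) [] (List.drop 0 []) tc = pvALoop m r [] [el] (0 + 1) from
            by simp [pvALoop, ht, hge]]
          have h2 := ih [el] 0 (0 + 1) (by simp) (by simp) (by simp)
          simp only [List.drop_zero, List.length_singleton, List.singleton_append] at h2
          rw [h2]
          simp [pvGB, ht, hge]
        · -- current nonempty: a group [pre.drop j] is emitted, boundary at pre.length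
          have hjlt : j < pre.length := by
            by_contra h
            exact hcur (List.drop_eq_nil_of_le (by omega))
          rw [show pvALoop m (el :: r) [] (pre.drop j) tc
                = pvALoop m r [pre.drop j] [el] (0 + 1) from
            by simp [pvALoop, ht, hge, hcur]]
          rw [pvALoop_acc m r [pre.drop j] [el] (0 + 1), pvFin_append]
          have h2 := ih (pre ++ [el]) pre.length (0 + 1)
            (by simp) (by intro h; exfalso; simp at h) (by simp)
          rw [List.drop_left] at h2
          rw [h2]
          have hn0 : pre.length ≠ 0 := by omega
          rw [show pvGB m (el :: r) pre.length tc = pre.length :: pvGB m r (pre.length + 1) 1 from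
            by simp [pvGB, ht, hge, hn0]]
          simp only [List.cons_append]
          rw [pvChunks_cons]
          rw [pvSl_prefix pre (el :: r) j (le_of_lt hjlt)]
          simp [List.append_assoc]
      · -- table but under the limit
        rw [show pvALoop m (el :: r) [] (pre.drop j) tc
              = pvALoop m r [] (pre.drop j ++ [el]) (tc + 1) from by simp [pvALoop, ht, hge]]
        rw [show pre.drop j ++ [el] = (pre ++ [el]).drop j from
          (List.drop_append_of_le_length hj).symm]
        have h2 := ih (pre ++ [el]) j (tc + 1)
          (by simp; omega) (by intro h; exfalso; simp at h; omega) (by simp)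
        rw [h2]
        rw [show pvGB m (el :: r) pre.length tc = pvGB m r (pre.length + 1) (tc + 1) from
          by simp [pvGB, ht, hge]]
        simp
    · -- non-table element
      rw [show pvALoop m (el :: r) [] (pre.drop j) tc
            = pvALoop m r [] (pre.drop j ++ [el]) tc from by simp [pvALoop, ht]]
      rw [show pre.drop j ++ [el] = (pre ++ [el]).drop j from
        (List.drop_append_of_le_length hj).symm]
      have h2 := ih (pre ++ [el]) j tc
        (by simp; omega) (by intro h; exfalso; simp at h; omega) (by simp)
      rw [h2]
      rw [show pvGB m (el :: r) pre.length tc = pvGB m r (pre.length + 1) tc from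
        by simp [pvGB, ht]]
      simp

lemma pvChunks_map_cast (es : List (List (String × String))) (bs : List Nat) :
    (((bs.map (fun n => (n : Int))).zip (bs.map (fun n => (n : Int))).tail).map
      (fun p => PySem.List.slice es (some p.1) (some p.2))) = pvChunks es bs := by
  induction bs with
  | nil => rfl
  | cons a t ih =>
    cases t with
    | nil => rfl
    | cons b t2 =>
      rw [pvChunks_cons, ← ih]
      simp [pvSl, PySem.List.slice_natCast]

lemma pvChunks_ne_nil (es : List (List (String × String))) (b : Nat) (l : List Nat) (n : Nat) :
    pvChunks es (b :: l ++ [n]) ≠ [] := by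
  cases l <;> simp [pvChunks]

-- ===== VERDICT (by name: the statement is the Claim_ definition above) =====
theorem split_elements_by_table_limit_py_spec : Claim_equal_split_elements_by_table_limit_py := by
  unfold Claim_equal_split_elements_by_table_limit_py Spec_split_elements_by_table_limit_py
  intro elements max_tables _
  unfold split_elements_by_table_limit_py split_elements_by_table_limit_py_alt
  by_cases h : elements = []
  · simp [h]
  · simp only [h, if_false]
    have hmain := pvMain max_tables elements [] 0 0 (by simp) (by simp)
      (by simpa using h)
    simp only [List.drop_nil, List.nil_append, List.length_nil] at hmain
    have hb := pvBfold max_tables elements 0 [0] 0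
    simp only [Nat.cast_zero] at hb
    have hb2 : (((PySem.List.enumerate elements 0).foldl (pvBStep max_tables) ([0], 0)).1
        ++ [PySem.List.len elements])
        = ((0 :: pvGB max_tables elements 0 0 ++ [elements.length]).map (fun n => (n : Int))) := by
      rw [hb]
      simp [PySem.List.len_eq]
    show (if pvFin (pvALoop max_tables elements [] [] 0) = [] then [[]]
          else pvFin (pvALoop max_tables elements [] [] 0)) = _
    rw [hmain, if_neg (pvChunks_ne_nil elements 0 (pvGB max_tables elements 0 0) elements.length)]
    show _ = ((_ ++ [PySem.List.len elements]).zip (_ ++ [PySem.List.len elements]).tail).map _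
    rw [hb2, pvChunks_map_cast]
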